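-- pv_equiv track=rewrite | github.com/darrenangle/abide | tests/forms/test_forms.py | _same_end_word_stanzas
-- ===== SOURCE A (Python) =====
-- def _same_end_word_stanzas(
--     stanza_size: int, stanza_count: int, tail_sizes: list[int] | None = None
-- ) -> str:
--     stanzas = [
--         "\n".join([f"line {line_no} stone" for line_no in range(stanza_size)])
--         for _ in range(stanza_count)
--     ]
--     for index, tail_size in enumerate(tail_sizes or (), start=1):
--         stanzas.append("\n".join([f"tail {index}-{line_no} stone" for line_no in range(tail_size)]))
--     return "\n\n".join(stanzas)
-- ===== SOURCE B (Python) =====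
-- def _same_end_word_stanzas(
--     stanza_size: int, stanza_count: int, tail_sizes: list[int] | None = None
-- ) -> str:
--     # Flat single pass: append every line to one output string, writing the
--     # separator ("\n" inside a stanza, "\n\n" before each later stanza)
--     # explicitly instead of building per-stanza strings and joining them.
--     specs = [("line ", stanza_size)] * stanza_count + [
--         (f"tail {k}-", size) for k, size in enumerate(tail_sizes or (), start=1)
--     ]
--     out = ""
--     first_stanza = True
--     for prefix, size in specs:
--         if not first_stanza:
--             out += "\n\n"
--         first_stanza = False
--         first_line = True
--         for i in range(size):
--             if not first_line:
--                 out += "\n"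
--             first_line = False
--             out += f"{prefix}{i} stone"
--     return out
-- ===== Notes on version B (the rewrite author's own statement) =====
-- stated objective: alternative
-- what changed: B replaces A's build-stanza-strings-then-join structure with a single flat pass over (prefix,size) stanza specs that emits every line into one token buffer, writing the '\n' and '\n\n' separators explicitly via first-flags, joined once at the end.
import Mathlib
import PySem

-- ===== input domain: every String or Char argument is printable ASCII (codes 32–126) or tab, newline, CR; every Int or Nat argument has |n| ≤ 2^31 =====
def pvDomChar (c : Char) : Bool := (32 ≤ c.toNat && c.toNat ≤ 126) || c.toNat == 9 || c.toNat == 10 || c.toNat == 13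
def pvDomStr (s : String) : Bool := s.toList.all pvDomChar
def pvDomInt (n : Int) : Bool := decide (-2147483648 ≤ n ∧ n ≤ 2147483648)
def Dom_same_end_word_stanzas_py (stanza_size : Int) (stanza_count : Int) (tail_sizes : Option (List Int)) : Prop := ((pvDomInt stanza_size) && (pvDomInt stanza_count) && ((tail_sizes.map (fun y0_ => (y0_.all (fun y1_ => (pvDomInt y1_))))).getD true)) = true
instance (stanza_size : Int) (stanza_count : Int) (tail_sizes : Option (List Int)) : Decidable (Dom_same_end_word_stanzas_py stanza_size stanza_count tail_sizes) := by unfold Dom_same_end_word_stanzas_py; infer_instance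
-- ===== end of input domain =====

-- B makes a single flat pass emitting every line into one token buffer with explicit
-- separators, instead of building a list of per-stanza strings and joining them (alternative decomposition).
-- ===== PORT A =====
def same_end_word_stanzas_py (stanza_size : Int) (stanza_count : Int) (tail_sizes : Option (List Int)) : String :=
  let stanzas : List String :=
    (PySem.List.pyRange 0 stanza_count 1).map (fun _ =>
      PySem.Str.join "\n" ((PySem.List.pyRange 0 stanza_size 1).map
        (fun line_no => "line " ++ PySem.Int.toStr line_no ++ " stone")))
  let stanzas :=
    (PySem.List.enumerate (tail_sizes.getD []) 1).foldl (fun acc p =>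
      acc ++ [PySem.Str.join "\n" ((PySem.List.pyRange 0 p.2 1).map
        (fun line_no => "tail " ++ PySem.Int.toStr p.1 ++ "-" ++ PySem.Int.toStr line_no ++ " stone"))]) stanzas
  PySem.Str.join "\n\n" stanzas

-- ===== PORT B =====
-- B-side helper: the (prefix, size) spec of every stanza, in order.
def pvSpecs (stanza_size : Int) (stanza_count : Int) (tail_sizes : Option (List Int)) : List (String × Int) :=
  PySem.List.pyRepeat [("line ", stanza_size)] stanza_count ++
  (PySem.List.enumerate (tail_sizes.getD []) 1).map
    (fun p => ("tail " ++ PySem.Int.toStr p.1 ++ "-", p.2))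

def same_end_word_stanzas_py_alt (stanza_size : Int) (stanza_count : Int) (tail_sizes : Option (List Int)) : String :=
  let res :=
    (pvSpecs stanza_size stanza_count tail_sizes).foldl
      (fun (st : String × Bool) spec =>
        let inner :=
          (PySem.List.pyRange 0 spec.2 1).foldl
            (fun (st2 : String × Bool) i =>
              (st2.1 ++ (if st2.2 then "" else "\n") ++ (spec.1 ++ PySem.Int.toStr i ++ " stone"), false))
            (st.1 ++ (if st.2 then "" else "\n\n"), true)
        (inner.1, false))
      ("", true)
  res.1

-- ===== PRECONDITION & SPEC =====
def Spec_same_end_word_stanzas_py (stanza_size : Int) (stanza_count : Int) (tail_sizes : Option (List Int)) (out : String) : Prop := out = same_end_word_stanzas_py_alt stanza_size stanza_count tail_sizes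
instance (stanza_size : Int) (stanza_count : Int) (tail_sizes : Option (List Int)) (out : String) : Decidable (Spec_same_end_word_stanzas_py stanza_size stanza_count tail_sizes out) := by unfold Spec_same_end_word_stanzas_py; infer_instance

-- ===== CLAIM =====
def Claim_equal_same_end_word_stanzas_py : Prop := ∀ (stanza_size : Int) (stanza_count : Int) (tail_sizes : Option (List Int)), Dom_same_end_word_stanzas_py stanza_size stanza_count tail_sizes → Spec_same_end_word_stanzas_py stanza_size stanza_count tail_sizes (same_end_word_stanzas_py stanza_size stanza_count tail_sizes)

-- ===== LEMMAS AND PROOFS =====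

-- one line of a stanza, and the whole stanza as A builds it
def pvLine (p : String) (i : Int) : String := p ++ PySem.Int.toStr i ++ " stone"
def pvStanza (spec : String × Int) : String :=
  PySem.Str.join "\n" ((PySem.List.pyRange 0 spec.2 1).map (fun i => pvLine spec.1 i))

-- the tail of a sep-separated run, and a whole run, as B's accumulator lays them out
def pvTailCat (sep : String) : List String → String
  | [] => ""
  | t :: ts => sep ++ t ++ pvTailCat sep ts

def pvRunsS (sep : String) (rs : List String) : String :=
  match rs with
  | [] => ""
  | r :: rest => r ++ pvTailCat sep rest

theorem pvFoldS_false {α : Type} (sep : String) (f : α → String) :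
    ∀ (l : List α) (acc : String),
      l.foldl (fun (st : String × Bool) x => (st.1 ++ (if st.2 then "" else sep) ++ f x, false)) (acc, false)
        = (acc ++ pvTailCat sep (l.map f), false) := by
  intro l
  induction l with
  | nil => intro acc; simp [pvTailCat]
  | cons x xs ih =>
    intro acc
    rw [List.foldl_cons, ih]
    simp [pvTailCat, String.append_assoc]

theorem pvFoldS_true {α : Type} (sep : String) (f : α → String) (l : List α) (acc : String) :
    l.foldl (fun (st : String × Bool) x => (st.1 ++ (if st.2 then "" else sep) ++ f x, false)) (acc, true)
      = (acc ++ pvRunsS sep (l.map f), l.isEmpty) := by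
  cases l with
  | nil => simp [pvRunsS]
  | cons x xs =>
    rw [List.foldl_cons, pvFoldS_false]
    simp [pvRunsS, String.append_assoc]

theorem pvTailCat_chars (sep : String) :
    ∀ (rest : List String) (r : String),
      (r ++ pvTailCat sep rest).toList
        = PySem.Chars.join sep.toList (List.map String.toList (r :: rest)) := by
  intro rest
  induction rest with
  | nil => intro r; simp [pvTailCat, PySem.Chars.join_singleton]
  | cons t ts ih =>
    intro r
    have h := ih t
    simp only [List.map_cons] at h ⊢
    rw [PySem.Chars.join_cons_cons, ← h]
    simp [pvTailCat, String.toList_append, String.append_assoc]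

theorem pvRunsS_eq_join (sep : String) (rs : List String) :
    pvRunsS sep rs = PySem.Str.join sep rs := by
  apply String.toList_inj.mp
  rw [PySem.Str.toList_join]
  cases rs with
  | nil => simp [pvRunsS, PySem.Chars.join_nil]
  | cons r rest => exact pvTailCat_chars sep rest r

theorem pvInnerS_eq (spec : String × Int) (acc : String) :
    ((PySem.List.pyRange 0 spec.2 1).foldl
      (fun (st2 : String × Bool) i =>
        (st2.1 ++ (if st2.2 then "" else "\n") ++ (spec.1 ++ PySem.Int.toStr i ++ " stone"), false))
      (acc, true)).1 = acc ++ pvStanza spec := by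
  rw [pvFoldS_true "\n" (fun i => spec.1 ++ PySem.Int.toStr i ++ " stone")]
  show acc ++ pvRunsS "\n" _ = _
  rw [pvRunsS_eq_join]
  rfl

theorem pvB_eq (stanza_size : Int) (stanza_count : Int) (tail_sizes : Option (List Int)) :
    same_end_word_stanzas_py_alt stanza_size stanza_count tail_sizes
      = PySem.Str.join "\n\n" ((pvSpecs stanza_size stanza_count tail_sizes).map pvStanza) := by
  unfold same_end_word_stanzas_py_alt
  simp only [pvInnerS_eq]
  rw [pvFoldS_true "\n\n" pvStanza]
  rw [pvRunsS_eq_join]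
  simp

theorem pvA_eq (stanza_size : Int) (stanza_count : Int) (tail_sizes : Option (List Int)) :
    same_end_word_stanzas_py stanza_size stanza_count tail_sizes
      = PySem.Str.join "\n\n" ((pvSpecs stanza_size stanza_count tail_sizes).map pvStanza) := by
  simp only [same_end_word_stanzas_py, pvSpecs]
  rw [PySem.List.foldl_append_singleton_eq_map]
  congr 1
  rw [List.map_append]
  congr 1
  · rw [PySem.List.pyRepeat_singleton, List.map_const', PySem.List.length_pyRange_one, List.map_replicate]
    simp [pvStanza, pvLine]
  · simp [List.map_map, Function.comp, pvStanza, pvLine, String.append_assoc]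

-- ===== VERDICT =====
theorem same_end_word_stanzas_py_spec : Claim_equal_same_end_word_stanzas_py := by
  intro stanza_size stanza_count tail_sizes _
  unfold Spec_same_end_word_stanzas_py
  rw [pvA_eq, pvB_eq]
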